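-- pv_equiv track=rewrite | github.com/jhg3410/Algorithm | 백준/Silver/9519. 졸려/졸려.py | solution
-- ===== SOURCE A (Python) =====
-- def solution(s):
--     length = len(s)
--     back_length = length//2
--     front= s[:length-back_length]
--     back= s[length-back_length:]
--     back = back[::-1]
--     i = 0
--     answer= ''
--     while True:
--         if i < len(front):
--             answer+=front[i]
--         if i < len(back):
--             answer+=back[i]
--         if i >= len(front):
--             break
--         i += 1
--     return answer
-- ===== SOURCE B (Python) =====
-- def solution(s):
--     out = []
--     while len(s) > 1:
--         out.append(s[0])
--         out.append(s[-1])
--         s = s[1:-1]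
--     if s:
--         out.append(s)
--     return ''.join(out)
-- ===== Notes on version B (the rewrite author's own statement) =====
-- stated objective: simpler
-- what changed: B peels characters from both ends of a shrinking string (first, last, then recurse on s[1:-1]) instead of building front/back half slices, reversing the back half and interleaving them by index with a while/break loop.
import Mathlib
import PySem

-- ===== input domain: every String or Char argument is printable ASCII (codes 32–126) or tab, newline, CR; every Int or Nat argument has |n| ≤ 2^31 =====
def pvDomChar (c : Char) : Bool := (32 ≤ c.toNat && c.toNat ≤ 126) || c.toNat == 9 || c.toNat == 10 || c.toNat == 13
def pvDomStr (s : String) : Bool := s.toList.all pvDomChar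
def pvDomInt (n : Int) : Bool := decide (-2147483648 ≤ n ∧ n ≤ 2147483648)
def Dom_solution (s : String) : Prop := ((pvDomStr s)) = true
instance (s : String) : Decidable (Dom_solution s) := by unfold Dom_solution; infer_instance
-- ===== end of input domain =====

-- B peels characters from both ends of a shrinking string instead of slicing the
-- string into halves, reversing the back half and interleaving by index (simpler).

-- ===== PORT A =====
def aLoop (front back : List Char) (i : Int) (answer : List Char) : List Char :=
  let a1 := if i < (front.length : Int) then answer ++ [PySem.List.pyGetD front i ' '] else answer
  let a2 := if i < (back.length : Int) then a1 ++ [PySem.List.pyGetD back i ' '] else a1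
  if h : (front.length : Int) ≤ i then a2
  else aLoop front back (i + 1) a2
termination_by ((front.length : Int) - i).toNat
decreasing_by omega

def solution (s : String) : String :=
  let l := s.toList
  let length : Int := (l.length : Int)
  let back_length : Int := PySem.Int.floordiv length 2
  let front := PySem.List.slice l none (some (length - back_length))
  let back0 := PySem.List.slice l (some (length - back_length)) none
  let back := (PySem.List.slice? back0 none none (-1)).getD []
  String.mk (aLoop front back 0 [])

-- ===== PORT B =====
-- s[1:-1] equals dropping the first and last characters; cited by bLoop's termination proof
theorem pv_slice_mid (s : List Char) : PySem.List.slice s (some 1) (some (-1)) = s.tail.dropLast := by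
  rcases s with _ | ⟨x, t⟩
  · simp [PySem.List.slice, PySem.List.clampIdx]
  · simp [PySem.List.slice, PySem.List.clampIdx, List.dropLast_eq_take]
    have h : ¬((t.length : Int) < 0) := by omega
    simp [h]

def bLoop (s : List Char) (out : List Char) : List Char :=
  if h : 1 < s.length then
    bLoop (PySem.List.slice s (some 1) (some (-1)))
      (out ++ [PySem.List.pyGetD s 0 ' ', PySem.List.pyGetD s (-1) ' '])
  else if s ≠ [] then out ++ s else out
termination_by s.length
decreasing_by
  rw [pv_slice_mid]
  simp [List.length_dropLast, List.length_tail]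
  omega

def solution_alt (s : String) : String := String.mk (bLoop s.toList [])

-- ===== PRECONDITION & SPEC =====
def Spec_solution (s : String) (out : String) : Prop := out = solution_alt s
instance (s : String) (out : String) : Decidable (Spec_solution s out) := by unfold Spec_solution; infer_instance

-- ===== CLAIM (what is proved, stated in full; the proofs are below) =====
def Claim_equal_solution : Prop := ∀ (s : String), Dom_solution s → Spec_solution s (solution s)

-- ===== LEMMAS AND PROOFS =====

theorem pyGetD_succ (B : List Char) (i : Int) (h : 0 ≤ i) (d : Char) :
    PySem.List.pyGetD B (i + 1) d = PySem.List.pyGetD B.tail i d := by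
  obtain ⟨n, rfl⟩ := Int.eq_ofNat_of_zero_le h
  have h1 : ((n : Int) + 1) = ((n + 1 : Nat) : Int) := by push_cast; ring
  rw [h1, PySem.List.pyGetD_natCast, PySem.List.pyGetD_natCast]
  cases B <;> simp [List.getD]

theorem aLoop_shift : ∀ (fuel : Nat) (F B acc : List Char) (i : Int), 0 ≤ i →
    (((F.length : Int) - i).toNat ≤ fuel) →
    aLoop F B (i + 1) acc = aLoop F.tail B.tail i acc := by
  intro fuel
  induction fuel with
  | zero =>
    intro F B acc i hi hf
    rw [aLoop]; conv_rhs => rw [aLoop]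
    have hF : ((F.tail.length : Int)) = (F.length : Int) - 1 ∨ F = [] := by
      cases F <;> simp [List.length_tail] <;> omega
    have hle : (F.length : Int) ≤ i + 1 := by omega
    have hle' : (F.tail.length : Int) ≤ i := by
      rcases hF with h | h
      · omega
      · simp [h]; omega
    simp only [dif_pos hle, dif_pos hle']
    have hfi : ¬ (i + 1 < (F.length : Int)) := by omega
    have hfi' : ¬ (i < (F.tail.length : Int)) := by omega
    rw [if_neg hfi, if_neg hfi', pyGetD_succ B i hi]
    have hBlen : (i + 1 < (B.length : Int)) ↔ (i < (B.tail.length : Int)) := by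
      cases B <;> simp [List.length_tail] <;> omega
    by_cases hb : i + 1 < (B.length : Int)
    · rw [if_pos hb, if_pos (hBlen.mp hb)]
    · rw [if_neg hb, if_neg (fun hc => hb (hBlen.mpr hc))]
  | succ fuel ih =>
    intro F B acc i hi hf
    rw [aLoop]; conv_rhs => rw [aLoop]
    have hBlen : (i + 1 < (B.length : Int)) ↔ (i < (B.tail.length : Int)) := by
      cases B <;> simp [List.length_tail] <;> omega
    have hFlen : (i + 1 < (F.length : Int)) ↔ (i < (F.tail.length : Int)) := by
      cases F <;> simp [List.length_tail] <;> omega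
    have hFle : ((F.length : Int) ≤ i + 1) ↔ ((F.tail.length : Int) ≤ i) := by
      cases F <;> simp [List.length_tail] <;> omega
    rw [pyGetD_succ B i hi, pyGetD_succ F i hi]
    by_cases hF : (F.length : Int) ≤ i + 1
    · simp only [dif_pos hF, dif_pos (hFle.mp hF)]
      by_cases hf1 : i + 1 < (F.length : Int)
      · rw [if_pos hf1, if_pos (hFlen.mp hf1)]
        by_cases hb : i + 1 < (B.length : Int)
        · rw [if_pos hb, if_pos (hBlen.mp hb)]
        · rw [if_neg hb, if_neg (fun hc => hb (hBlen.mpr hc))]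
      · rw [if_neg hf1, if_neg (fun hc => hf1 (hFlen.mpr hc))]
        by_cases hb : i + 1 < (B.length : Int)
        · rw [if_pos hb, if_pos (hBlen.mp hb)]
        · rw [if_neg hb, if_neg (fun hc => hb (hBlen.mpr hc))]
    · simp only [dif_neg hF, dif_neg (fun hc => hF (hFle.mpr hc))]
      have hf1 : i + 1 < (F.length : Int) := by omega
      rw [if_pos hf1, if_pos (hFlen.mp hf1)]
      have heq : ∀ acc', aLoop F B (i + 1 + 1) acc' = aLoop F.tail B.tail (i + 1) acc' := by
        intro acc'
        exact ih F B acc' (i + 1) (by omega) (by omega)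
      by_cases hb : i + 1 < (B.length : Int)
      · rw [if_pos hb, if_pos (hBlen.mp hb)]
        exact heq _
      · rw [if_neg hb, if_neg (fun hc => hb (hBlen.mpr hc))]
        exact heq _

-- the front/back halves of x :: m ++ [y] are x/y consed onto the halves of m
theorem front_cons (m : List Char) (x y : Char) :
    (x :: (m ++ [y])).take ((x :: (m ++ [y])).length - (x :: (m ++ [y])).length / 2)
      = x :: m.take (m.length - m.length / 2) := by
  have hk : (x :: (m ++ [y])).length - (x :: (m ++ [y])).length / 2
      = (m.length - m.length / 2) + 1 := by simp; omega
  rw [hk]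
  simp [List.take_append, Nat.sub_le]

theorem back_cons (m : List Char) (x y : Char) :
    ((x :: (m ++ [y])).drop ((x :: (m ++ [y])).length - (x :: (m ++ [y])).length / 2)).reverse
      = y :: (m.drop (m.length - m.length / 2)).reverse := by
  have hk : (x :: (m ++ [y])).length - (x :: (m ++ [y])).length / 2
      = (m.length - m.length / 2) + 1 := by simp; omega
  rw [hk]
  simp [List.drop_append, Nat.sub_le]

theorem main_loop : ∀ (fuel : Nat) (m : List Char), m.length ≤ fuel → ∀ (acc : List Char),
    aLoop (m.take (m.length - m.length / 2)) ((m.drop (m.length - m.length / 2)).reverse) 0 acc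
      = bLoop m acc := by
  intro fuel
  induction fuel with
  | zero =>
    intro m hm acc
    have : m = [] := by cases m <;> simp_all
    subst this
    rw [aLoop, bLoop]
    simp
  | succ fuel ih =>
    intro m hm acc
    match m with
    | [] => rw [aLoop, bLoop]; simp
    | [c] =>
      rw [aLoop]
      norm_num
      rw [aLoop, bLoop]
      norm_num [PySem.List.pyGetD_zero_cons]
    | x :: d :: rest =>
      obtain ⟨m', y, hmy⟩ : ∃ m' y, d :: rest = m' ++ [y] :=
        ⟨(d :: rest).dropLast, (d :: rest).getLast (by simp), (List.dropLast_append_getLast (by simp)).symm⟩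
      rw [hmy]
      rw [front_cons, back_cons]
      rw [aLoop]
      have h1 : ¬ ((((x :: m'.take (m'.length - m'.length / 2)).length : Int)) ≤ 0) := by
        simp
      rw [dif_neg h1]
      have h2 : (0 : Int) < ((x :: m'.take (m'.length - m'.length / 2)).length : Int) := by
        simp
      have h3 : (0 : Int) < ((y :: (m'.drop (m'.length - m'.length / 2)).reverse).length : Int) := by
        simp
      rw [if_pos h2, if_pos h3]
      rw [PySem.List.pyGetD_zero_cons, PySem.List.pyGetD_zero_cons]
      have hshift := aLoop_shift ((x :: m'.take (m'.length - m'.length / 2)).length)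
        (x :: m'.take (m'.length - m'.length / 2))
        (y :: (m'.drop (m'.length - m'.length / 2)).reverse)
        (acc ++ [x] ++ [y]) 0 (by omega) (by omega)
      rw [show (0 : Int) + 1 = 0 + 1 from rfl] at hshift
      rw [hshift]
      simp only [List.tail_cons]
      rw [ih m' (by have := congrArg List.length hmy; simp at this hm; omega) (acc ++ [x] ++ [y])]
      conv_rhs => rw [bLoop]
      have hlen : 1 < (x :: (m' ++ [y])).length := by simp
      rw [dif_pos hlen, pv_slice_mid]
      rw [PySem.List.pyGetD_zero_cons]
      have hy : PySem.List.pyGetD (x :: (m' ++ [y])) (-1) ' ' = y := by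
        rw [show (x :: (m' ++ [y])) = ((x :: m') ++ [y]) by simp]
        exact PySem.List.pyGetD_neg_one_append_singleton _ _ _
      rw [hy]
      simp

theorem slice_front_eq (l : List Char) :
    PySem.List.slice l none (some ((l.length : Int) - PySem.Int.floordiv (l.length : Int) 2))
      = l.take (l.length - l.length / 2) := by
  rw [PySem.Int.floordiv_eq_ediv_of_pos (by norm_num)]
  have h : (l.length : Int) - (l.length : Int) / 2 = ((l.length - l.length / 2 : Nat) : Int) := by
    omega
  rw [h, PySem.List.slice_to_natCast]

theorem slice_back_eq (l : List Char) :
    PySem.List.slice l (some ((l.length : Int) - PySem.Int.floordiv (l.length : Int) 2)) none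
      = l.drop (l.length - l.length / 2) := by
  rw [PySem.Int.floordiv_eq_ediv_of_pos (by norm_num)]
  have h : (l.length : Int) - (l.length : Int) / 2 = ((l.length - l.length / 2 : Nat) : Int) := by
    omega
  rw [h, PySem.List.slice_from_natCast]

-- ===== VERDICT (by name: the statement is the Claim_ definition above) =====
theorem solution_spec : Claim_equal_solution := by
  intro s _
  unfold Spec_solution solution solution_alt
  simp only [slice_front_eq, slice_back_eq, PySem.List.slice?_none_none_neg_one, Option.getD_some]
  rw [main_loop s.toList.length s.toList (le_refl _) []]
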